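-- pv_equiv track=rewrite | github.com/SubhankarGhosh/CodingBat | Warmup-2/string_match.py | string_match
-- ===== SOURCE A (Python) =====
-- def string_match(a, b):
--   lena = len(a)
--   lenb = len(b)
--   mini = min(lena, lenb)
--   count = 0
--   for i in range(mini-1):
--     if a[i:i+2] == b[i:i+2]:
--       count = count + 1
--   return count
-- ===== SOURCE B (Python) =====
-- def string_match(a, b):
--   # run-length formulation: the answer equals the sum, over maximal runs of
--   # positions where a and b agree, of (run_length - 1)
--   total = 0
--   run = 0
--   for x, y in zip(a, b):
--     if x == y:
--       run += 1
--     else: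
--       if run > 1:
--         total += run - 1
--       run = 0
--   if run > 1:
--     total += run - 1
--   return total
-- ===== Notes on version B (the rewrite author's own statement) =====
-- stated objective: alternative
-- what changed: B computes the count as the sum over maximal runs of positions where the strings agree of (run length - 1), maintaining a current-run-length accumulator, instead of A's loop comparing a freshly sliced two-character window at each index.
import Mathlib
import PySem

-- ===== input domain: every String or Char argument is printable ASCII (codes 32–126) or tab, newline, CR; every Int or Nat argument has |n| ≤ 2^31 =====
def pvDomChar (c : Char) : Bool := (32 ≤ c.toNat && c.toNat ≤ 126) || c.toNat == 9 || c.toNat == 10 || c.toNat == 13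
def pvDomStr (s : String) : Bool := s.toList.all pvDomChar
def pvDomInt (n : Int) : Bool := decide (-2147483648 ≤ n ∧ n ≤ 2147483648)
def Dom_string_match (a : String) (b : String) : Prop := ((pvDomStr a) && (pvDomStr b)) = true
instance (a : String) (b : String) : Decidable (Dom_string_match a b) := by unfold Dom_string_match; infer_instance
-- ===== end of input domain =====

-- B counts via maximal runs of agreeing positions (sum of run_length - 1) instead of A's two-character window comparison; return value equivalence proved.

-- ===== PORT A =====
def string_match (a : String) (b : String) : Int :=
  let lena : Int := PySem.Str.len a
  let lenb : Int := PySem.Str.len b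
  let mini : Int := min lena lenb
  (PySem.List.pyRange 0 (mini - 1) 1).foldl
    (fun count i =>
      if PySem.List.slice a.toList (some i) (some (i + 2))
           = PySem.List.slice b.toList (some i) (some (i + 2))
      then count + 1 else count) 0

-- ===== PORT B =====
def string_match_alt (a : String) (b : String) : Int :=
  let s : Int × Int := (a.toList.zip b.toList).foldl
    (fun s p =>
      if p.1 == p.2 then (s.1, s.2 + 1)
      else (if s.2 > 1 then s.1 + s.2 - 1 else s.1, 0)) (0, 0)
  if s.2 > 1 then s.1 + s.2 - 1 else s.1

-- ===== PRECONDITION & SPEC =====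
def Spec_string_match (a : String) (b : String) (out : Int) : Prop := out = string_match_alt a b
instance (a : String) (b : String) (out : Int) : Decidable (Spec_string_match a b out) := by unfold Spec_string_match; infer_instance

-- ===== CLAIM (what is proved, stated in full; the proofs are below) =====
def Claim_equal_string_match : Prop := ∀ (a : String) (b : String), Dom_string_match a b → Spec_string_match a b (string_match a b)

-- ===== LEMMAS AND PROOFS =====

-- number of adjacent (true, true) pairs in a boolean list (common reference value)
def pvAdjPairs : List Bool → Int
  | x :: y :: rest => (if x && y then 1 else 0) + pvAdjPairs (y :: rest)
  | _ => 0

-- B's loop body and final flush, named so the invariant below has stable patterns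
def pvStep (s : Int × Int) (x : Bool) : Int × Int :=
  if x then (s.1, s.2 + 1) else (if s.2 > 1 then s.1 + s.2 - 1 else s.1, 0)

def pvFinish (s : Int × Int) : Int := if s.2 > 1 then s.1 + s.2 - 1 else s.1

theorem pvAdjPairs_replicate (r : Nat) :
    pvAdjPairs (List.replicate (r + 1) true) = (r : Int) := by
  induction r with
  | zero => simp [pvAdjPairs]
  | succ s ih =>
      rw [List.replicate_succ, List.replicate_succ]
      rw [show pvAdjPairs (true :: true :: List.replicate s true)
            = (if true && true then (1:Int) else 0) + pvAdjPairs (true :: List.replicate s true) from rfl]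
      rw [← List.replicate_succ, ih]
      simp
      ring

theorem pvAdjPairs_replicate_val (r : Nat) :
    pvAdjPairs (List.replicate r true) = (if (r : Int) > 1 then (r : Int) - 1 else 0) := by
  cases r with
  | zero => simp [pvAdjPairs]
  | succ s =>
      rw [pvAdjPairs_replicate]
      cases s with
      | zero => norm_num
      | succ t => push_cast; rw [if_pos (by omega)]; ring

theorem pvAdjPairs_break (r : Nat) (m : List Bool) :
    pvAdjPairs (List.replicate r true ++ false :: m)
      = pvAdjPairs (List.replicate r true) + pvAdjPairs m := by
  induction r with
  | zero =>
      cases m with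
      | nil => simp [pvAdjPairs]
      | cons y rest => simp [pvAdjPairs]
  | succ s ih =>
      rw [List.replicate_succ, List.cons_append]
      cases s with
      | zero =>
          cases m with
          | nil => simp [pvAdjPairs]
          | cons y rest => simp [pvAdjPairs]
      | succ t =>
          rw [List.replicate_succ, List.cons_append]
          rw [show pvAdjPairs (true :: true :: (List.replicate t true ++ false :: m))
                = (if true && true then (1:Int) else 0)
                  + pvAdjPairs (true :: (List.replicate t true ++ false :: m)) from rfl]
          rw [show (true :: (List.replicate t true ++ false :: m))
                = (List.replicate (t+1) true ++ false :: m) from by rw [List.replicate_succ, List.cons_append]]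
          rw [ih]
          rw [show pvAdjPairs (true :: true :: List.replicate t true)
                = (if true && true then (1:Int) else 0) + pvAdjPairs (true :: List.replicate t true) from rfl]
          rw [← List.replicate_succ, pvAdjPairs_replicate]
          ring

-- B-side invariant: folding the run step then flushing gives t + adjacent pairs of (pending run ++ rest)
theorem pv_b_inv (m : List Bool) : ∀ (t : Int) (r : Nat),
    pvFinish (m.foldl pvStep (t, (r : Int)))
      = t + pvAdjPairs (List.replicate r true ++ m) := by
  induction m with
  | nil =>
      intro t r
      simp only [List.foldl_nil, List.append_nil, pvFinish]
      rw [pvAdjPairs_replicate_val]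
      split_ifs <;> ring
  | cons x m' ih =>
      intro t r
      cases x with
      | true =>
          rw [List.foldl_cons, show pvStep (t, (r : Int)) true = (t, ((r + 1 : Nat) : Int)) from by
            simp [pvStep]]
          rw [ih t (r + 1)]
          rw [show List.replicate (r+1) true ++ m' = List.replicate r true ++ true :: m' from by
            rw [List.replicate_succ']; simp]
      | false =>
          rw [List.foldl_cons, show pvStep (t, (r : Int)) false
                = ((if (r : Int) > 1 then t + (r : Int) - 1 else t), ((0 : Nat) : Int)) from by
            simp [pvStep]]
          rw [ih _ 0]
          simp only [List.replicate_zero, List.nil_append]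
          rw [pvAdjPairs_break, pvAdjPairs_replicate_val]
          split_ifs <;> ring

-- A-side: the indexed window count over a suffix equals pvAdjPairs of that suffix
theorem pv_a_idx (M : List Bool) : ∀ (m : List Bool) (k : Nat) (t : Int), m = M.drop k →
    (PySem.List.pyRange (k : Int) ((M.length : Int) - 1) 1).foldl
      (fun c i => if PySem.List.pyGetD M i false && PySem.List.pyGetD M (i + 1) false
                  then c + 1 else c) t
      = t + pvAdjPairs m := by
  intro m
  induction m with
  | nil =>
      intro k t hk
      have hlen : M.length ≤ k := by
        by_contra h
        have := List.drop_eq_nil_iff.mp hk.symm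
        omega
      rw [PySem.List.pyRange_one_eq_nil (by exact_mod_cast (by omega : (M.length : Int) - 1 ≤ (k : Int)))]
      simp [pvAdjPairs]
  | cons x m' ih =>
      intro k t hk
      have hklt : k < M.length := by
        have := congrArg List.length hk
        simp at this
        omega
      have hx : M[k] = x := by
        have h0 : (M.drop k)[0]'(by rw [List.length_drop]; omega) = x := by
          simp [← hk]
        rw [List.getElem_drop] at h0
        simpa using h0
      have hm' : m' = M.drop (k + 1) := by
        have := congrArg List.tail hk
        simpa [List.tail_drop] using this
      cases m' with
      | nil =>
          have hlen1 : M.length ≤ k + 1 := by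
            have := congrArg List.length hm'
            simp at this
            omega
          rw [PySem.List.pyRange_one_eq_nil (by exact_mod_cast (by omega : (M.length : Int) - 1 ≤ (k : Int)))]
          simp [pvAdjPairs]
      | cons y r' =>
          have hk1 : k + 1 < M.length := by
            have := congrArg List.length hm'
            simp at this
            omega
          have hy : M[k+1] = y := by
            have h0 : (M.drop (k+1))[0]'(by rw [List.length_drop]; omega) = y := by
              simp [← hm']
            rw [List.getElem_drop] at h0
            simpa using h0
          rw [PySem.List.pyRange_one_cons (by exact_mod_cast (by omega : (k : Int) < (M.length : Int) - 1))]
          rw [List.foldl_cons]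
          have hg1 : PySem.List.pyGetD M (k : Int) false = x := by
            rw [PySem.List.pyGetD_natCast]
            simp [List.getD, List.getElem?_eq_getElem hklt, hx]
          have hg2 : PySem.List.pyGetD M ((k : Int) + 1) false = y := by
            rw [show ((k : Int) + 1) = ((k + 1 : Nat) : Int) from by push_cast; ring,
              PySem.List.pyGetD_natCast]
            simp [List.getD, List.getElem?_eq_getElem hk1, hy]
          rw [hg1, hg2]
          rw [show ((k : Int) + 1) = ((k + 1 : Nat) : Int) from by push_cast; ring]
          rw [ih (k + 1) _ hm']
          rw [show pvAdjPairs (x :: y :: r')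
                = (if x && y then (1:Int) else 0) + pvAdjPairs (y :: r') from rfl]
          split_ifs <;> ring

theorem pv_take_two_drop {α : Type} (xs : List α) (n : Nat) (h : n + 1 < xs.length) :
    (xs.drop n).take 2 = [xs[n], xs[n + 1]] := by
  apply List.ext_getElem
  · simp; omega
  · intro i hi1 hi2
    simp only [List.getElem_take, List.getElem_drop]
    have : i < 2 := by simp at hi2; omega
    interval_cases i <;> simp

-- ===== VERDICT (by name: the statement is the Claim_ definition above) =====
theorem string_match_spec : Claim_equal_string_match := by
  intro a b _
  unfold Spec_string_match string_match string_match_alt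
  dsimp only
  set la := a.toList with hla
  set lb := b.toList with hlb
  set M : List Bool := (la.zip lb).map (fun p => p.1 == p.2) with hM
  have hlen : M.length = min la.length lb.length := by simp [hM]
  have hmini : min (PySem.Str.len a) (PySem.Str.len b) = ((M.length : Nat) : Int) := by
    simp [PySem.Str.len_eq, hlen, ← hla, ← hlb]
  rw [hmini]
  -- A side: replace the slice comparison at each in-range index by the matching booleans, then use pv_a_idx
  have hAeq := pv_a_idx M M 0 0 (by simp)
  simp only [Nat.cast_zero] at hAeq
  have hcongr : (PySem.List.pyRange 0 ((M.length : Int) - 1) 1).foldl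
      (fun count i =>
        if PySem.List.slice la (some i) (some (i + 2)) = PySem.List.slice lb (some i) (some (i + 2))
        then count + 1 else count) (0 : Int)
      = (PySem.List.pyRange 0 ((M.length : Int) - 1) 1).foldl
        (fun c i => if PySem.List.pyGetD M i false && PySem.List.pyGetD M (i + 1) false
                    then c + 1 else c) 0 := by
    apply PySem.List.foldl_congr_mem
    intro acc i hi
    rw [PySem.List.mem_pyRange_one] at hi
    obtain ⟨h0, h1⟩ := hi
    obtain ⟨n, rfl⟩ := Int.eq_ofNat_of_zero_le h0
    rw [hlen] at h1
    have hn : n + 1 < min la.length lb.length := by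
      exact_mod_cast (by omega : ((n + 1 : Nat) : Int) < (min la.length lb.length : Int))
    have hna : n + 1 < la.length := by omega
    have hnb : n + 1 < lb.length := by omega
    have hslice : ∀ (xs : List Char) (hx : n + 1 < xs.length),
        PySem.List.slice xs (some (n : Int)) (some ((n : Int) + 2))
          = [xs[n]'(by omega), xs[n + 1]'hx] := by
      intro xs hx
      have h2 : ((n : Int) + 2) = ((n + 2 : Nat) : Int) := by push_cast; ring
      rw [h2, PySem.List.slice_natCast, show n + 2 - n = 2 from by omega, pv_take_two_drop xs n hx]
    rw [hslice la hna, hslice lb hnb]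
    have hMn : n < M.length := by omega
    have hMn1 : n + 1 < M.length := by omega
    rw [PySem.List.pyGetD_natCast, show ((n : Int) + 1) = ((n + 1 : Nat) : Int) from by push_cast; ring,
      PySem.List.pyGetD_natCast]
    simp only [List.getD, List.getElem?_eq_getElem hMn, List.getElem?_eq_getElem hMn1, Option.getD_some]
    simp only [hM, List.getElem_map, List.getElem_zip]
    by_cases hq1 : la[n] = lb[n] <;> by_cases hq2 : la[n + 1] = lb[n + 1] <;> simp [hq1, hq2]
  rw [hcongr, hAeq]
  -- B side: the zip fold is the pvStep fold over M; use pv_b_inv with empty pending run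
  have hB := pv_b_inv M 0 0
  rw [List.replicate_zero, List.nil_append] at hB
  rw [hM, List.foldl_map] at hB
  simp only [Nat.cast_zero] at hB
  rw [← hB]
  rfl
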